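-- pv_equiv track=rewrite | github.com/kazamazza/pokerai | tools/demo/tiny_preflop_demo.py | build_id_maps
-- ===== SOURCE A (Python) =====
-- from typing import Dict, List, Sequence, Any, Tuple, Optional
--
-- def build_id_maps(
--     X: List[Dict[str,str]], feature_order: Sequence[str]
-- ) -> Tuple[Dict[str,Dict[str,int]], Dict[str,int]]:
--     id_maps: Dict[str, Dict[str,int]] = {}
--     cards: Dict[str, int] = {}
--     for feat in feature_order:
--         vals = sorted({row[feat] for row in X})
--         enc = {v:i for i,v in enumerate(vals)}
--         id_maps[feat] = enc
--         cards[feat]   = len(enc)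
--     return id_maps, cards
-- ===== SOURCE B (Python) =====
-- def _bst_insert(root, v):
--     # iterative insertion into a BST of distinct values; nodes are [left, key, right]
--     if root is None:
--         return [None, v, None]
--     cur = root
--     while True:
--         if v < cur[1]:
--             if cur[0] is None:
--                 cur[0] = [None, v, None]
--                 return root
--             cur = cur[0]
--         elif cur[1] < v:
--             if cur[2] is None:
--                 cur[2] = [None, v, None]
--                 return root
--             cur = cur[2]
--         else:
--             return root
--
--
-- def _bst_inorder(root):
--     # iterative in-order traversal: sorted distinct values
--     out, stack, cur = [], [], root
--     while cur is not None or stack: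
--         while cur is not None:
--             stack.append(cur)
--             cur = cur[0]
--         cur = stack.pop()
--         out.append(cur[1])
--         cur = cur[2]
--     return out
--
--
-- def build_id_maps(X, feature_order):
--     trees = {feat: None for feat in feature_order}
--     feats = list(trees)
--     for row in X:
--         for feat in feats:
--             trees[feat] = _bst_insert(trees[feat], row[feat])
--     id_maps, cards = {}, {}
--     for feat in feature_order:
--         enc = {}
--         for v in _bst_inorder(trees[feat]):
--             enc[v] = len(enc)
--         id_maps[feat] = enc
--         cards[feat] = len(enc)
--     return id_maps, cards
-- ===== Notes on version B (the rewrite author's own statement) =====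
-- stated objective: alternative
-- what changed: A scans X once per feature, deduplicates through a hash set and calls the built-in sort before enumerating; B makes a single pass over X inserting every value into a per-feature binary search tree (which deduplicates by itself) and reads the encoding off an in-order traversal, using no set and no sort.
import Mathlib
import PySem

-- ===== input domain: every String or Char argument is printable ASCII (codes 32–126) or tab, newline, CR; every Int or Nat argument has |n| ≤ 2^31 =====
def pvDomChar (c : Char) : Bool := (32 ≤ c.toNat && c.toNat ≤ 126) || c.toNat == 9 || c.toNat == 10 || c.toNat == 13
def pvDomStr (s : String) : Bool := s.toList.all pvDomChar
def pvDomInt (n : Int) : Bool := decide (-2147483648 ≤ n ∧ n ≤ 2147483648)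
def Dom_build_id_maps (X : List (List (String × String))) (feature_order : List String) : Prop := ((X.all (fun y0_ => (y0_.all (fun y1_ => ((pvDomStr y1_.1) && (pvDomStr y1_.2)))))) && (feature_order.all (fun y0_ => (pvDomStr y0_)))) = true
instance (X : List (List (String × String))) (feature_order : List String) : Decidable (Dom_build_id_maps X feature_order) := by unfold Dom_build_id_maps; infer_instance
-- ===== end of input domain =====

-- B replaces A's per-feature scans with sorted(set(...)) by ONE pass over X that inserts every
-- value into a per-feature binary search tree (deduplicating by itself), followed by an
-- in-order traversal per feature: no set, no sort (objective: alternative; not claimed faster).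

-- ===== PORT A =====
-- row[feat]: first-match lookup in the row's dict; Pre_ excludes the KeyError (none) case
def pyRowGet (row : List (String × String)) (feat : String) : String :=
  ((PySem.Dict.mk row).get? feat).getD ""

def build_id_maps (X : List (List (String × String))) (feature_order : List String) : (List (String × List (String × Int))) × (List (String × Int)) :=
  let st := feature_order.foldl
    (fun (st : PySem.Dict String (PySem.Dict String Int) × PySem.Dict String Int) feat =>
      -- vals = sorted({row[feat] for row in X})
      let vals := PySem.List.sorted (PySem.Set.ofList (X.map (fun row => pyRowGet row feat))) (fun v => v)
      -- enc = {v: i for i, v in enumerate(vals)}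
      let enc := (PySem.List.enumerate vals).foldl (fun (d : PySem.Dict String Int) p => d.insert p.2 p.1) PySem.Dict.empty
      (st.1.insert feat enc, st.2.insert feat (enc.size : Int)))
    (PySem.Dict.empty, PySem.Dict.empty)
  (st.1.items.map (fun p => (p.1, p.2.items)), st.2.items)

-- ===== PORT B =====
-- binary search tree of distinct strings (Source B's [left, key, right] nodes; None = leaf)
inductive Tr
  | leaf : Tr
  | node : Tr → String → Tr → Tr
deriving DecidableEq, Repr

-- _bst_insert: Source B's iterative loop rebuilds exactly this search-path recursion
def tins : Tr → String → Tr
  | .leaf, v => .node .leaf v .leaf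
  | .node l k r, v =>
      if v < k then .node (tins l v) k r
      else if k < v then .node l k (tins r v)
      else .node l k r

-- _bst_inorder: Source B's explicit-stack traversal is the standard in-order walk
def inord : Tr → List String
  | .leaf => []
  | .node l k r => inord l ++ k :: inord r

def build_id_maps_alt (X : List (List (String × String))) (feature_order : List String) : (List (String × List (String × Int))) × (List (String × Int)) :=
  -- trees = {feat: None for feat in feature_order}; feats = list(trees)  (first-occurrence dedup)
  let trees0 := feature_order.foldl (fun (d : PySem.Dict String Tr) f => d.insert f Tr.leaf) PySem.Dict.empty
  let feats : List String := PySem.Set.ofList feature_order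
  -- single pass over X: trees[feat] = _bst_insert(trees[feat], row[feat])
  -- (getD with leaf: the init loop put every feat of feats into the dict)
  let trees := X.foldl
    (fun (d : PySem.Dict String Tr) row =>
      feats.foldl (fun d feat => d.insert feat (tins (d.getD feat Tr.leaf) (pyRowGet row feat))) d)
    trees0
  -- second pass: enc from the in-order traversal, enc[v] = len(enc)
  let st := feature_order.foldl
    (fun (st : PySem.Dict String (PySem.Dict String Int) × PySem.Dict String Int) feat =>
      let enc := (inord (trees.getD feat Tr.leaf)).foldl
        (fun (d : PySem.Dict String Int) v => d.insert v (d.size : Int)) PySem.Dict.empty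
      (st.1.insert feat enc, st.2.insert feat (enc.size : Int)))
    (PySem.Dict.empty, PySem.Dict.empty)
  (st.1.items.map (fun p => (p.1, p.2.items)), st.2.items)

-- ===== PRECONDITION & SPEC =====
-- Pre_ excludes exactly the inputs where Python A raises KeyError: some feature of
-- feature_order missing from some row.
def Pre_build_id_maps (X : List (List (String × String))) (feature_order : List String) : Prop :=
  ∀ feat ∈ feature_order, ∀ row ∈ X, (PySem.Dict.mk row).contains feat = true
instance (X : List (List (String × String))) (feature_order : List String) : Decidable (Pre_build_id_maps X feature_order) := by unfold Pre_build_id_maps; infer_instance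

def pvWitness_build_id_maps : (List (List (String × String))) × List String :=
  ([[("rank", "A"), ("suit", "s")], [("rank", "K"), ("suit", "s")]], ["rank", "suit"])

def Spec_build_id_maps (X : List (List (String × String))) (feature_order : List String) (out : (List (String × List (String × Int))) × (List (String × Int))) : Prop := out = build_id_maps_alt X feature_order
instance (X : List (List (String × String))) (feature_order : List String) (out : (List (String × List (String × Int))) × (List (String × Int))) : Decidable (Spec_build_id_maps X feature_order out) := by unfold Spec_build_id_maps; infer_instance

-- ===== CLAIM (what is proved, stated in full; the proofs are below) =====
def Claim_equal_build_id_maps : Prop := ∀ (X : List (List (String × String))) (feature_order : List String), Dom_build_id_maps X feature_order → Pre_build_id_maps X feature_order → Spec_build_id_maps X feature_order (build_id_maps X feature_order)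

-- ===== LEMMAS AND PROOFS =====

-- ---- BST facts ----
def bst : Tr → Prop
  | .leaf => True
  | .node l k r => (∀ x ∈ inord l, x < k) ∧ (∀ x ∈ inord r, k < x) ∧ bst l ∧ bst r

lemma mem_inord_tins (t : Tr) (v x : String) :
    x ∈ inord (tins t v) ↔ x = v ∨ x ∈ inord t := by
  induction t with
  | leaf => simp [tins, inord]
  | node l k r ihl ihr =>
    by_cases h1 : v < k
    · simp [tins, inord, h1, ihl]; tauto
    · by_cases h2 : k < v
      · simp [tins, inord, h1, h2, ihr]; tauto
      · have : v = k := le_antisymm (not_lt.mp h2) (not_lt.mp h1)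
        subst this
        simp [tins, inord]; tauto

lemma bst_tins (t : Tr) (v : String) (h : bst t) : bst (tins t v) := by
  induction t with
  | leaf => simp [tins, bst, inord]
  | node l k r ihl ihr =>
    obtain ⟨hl, hr, bl, br⟩ := h
    by_cases h1 : v < k
    · have ht : tins (.node l k r) v = .node (tins l v) k r := by simp [tins, h1]
      rw [ht]
      refine ⟨?_, hr, ihl bl, br⟩
      intro x hx
      rcases (mem_inord_tins l v x).mp hx with rfl | hx
      · exact h1
      · exact hl x hx
    · by_cases h2 : k < v
      · have ht : tins (.node l k r) v = .node l k (tins r v) := by simp [tins, h1, h2]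
        rw [ht]
        refine ⟨hl, ?_, bl, ihr br⟩
        intro x hx
        rcases (mem_inord_tins r v x).mp hx with rfl | hx
        · exact h2
        · exact hr x hx
      · have ht : tins (.node l k r) v = .node l k r := by simp [tins, h1, h2]
        rw [ht]
        exact ⟨hl, hr, bl, br⟩

lemma pairwise_inord (t : Tr) (h : bst t) : (inord t).Pairwise (· < ·) := by
  induction t with
  | leaf => simp [inord]
  | node l k r ihl ihr =>
    obtain ⟨hl, hr, bl, br⟩ := h
    simp only [inord]
    rw [List.pairwise_append]
    refine ⟨ihl bl, List.pairwise_cons.mpr ⟨hr, ihr br⟩, ?_⟩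
    intro x hx y hy
    rcases List.mem_cons.mp hy with rfl | hy
    · exact hl x hx
    · exact lt_trans (hl x hx) (hr y hy)

lemma bst_foldl (L : List String) : ∀ t, bst t → bst (L.foldl tins t) := by
  induction L with
  | nil => intro t h; exact h
  | cons v L ih => intro t h; exact ih _ (bst_tins t v h)

lemma mem_inord_foldl (L : List String) : ∀ (t : Tr) (x : String),
    x ∈ inord (L.foldl tins t) ↔ x ∈ L ∨ x ∈ inord t := by
  induction L with
  | nil => simp
  | cons v L ih =>
    intro t x
    simp only [List.foldl_cons, ih, mem_inord_tins, List.mem_cons]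
    tauto

-- the in-order traversal of the insertion-built BST IS sorted(set(L))
lemma inord_foldl_eq_sorted (L : List String) :
    inord (L.foldl tins Tr.leaf) = PySem.List.sorted (PySem.Set.ofList L) (fun v => v) := by
  have hlt : (inord (L.foldl tins Tr.leaf)).Pairwise (· < ·) :=
    pairwise_inord _ (bst_foldl L Tr.leaf trivial)
  have hnd : (inord (L.foldl tins Tr.leaf)).Nodup := hlt.imp (fun h => ne_of_lt h)
  have hperm : (inord (L.foldl tins Tr.leaf)).Perm (PySem.Set.ofList L) := by
    rw [List.perm_ext_iff_of_nodup hnd (PySem.Set.nodup_ofList L)]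
    intro x
    rw [mem_inord_foldl, PySem.Set.mem_ofList]
    simp [inord]
  exact (PySem.List.sorted_eq_of_perm_of_pairwise_lt _ _ _ hperm hlt).symm

-- ---- the per-feature tree in B's dict is the fold of that feature's column ----

-- init loop: every lookup (default leaf) is leaf
lemma getD_init (l : List String) (k : String) : ∀ (d : PySem.Dict String Tr),
    d.getD k Tr.leaf = Tr.leaf →
    (l.foldl (fun (d : PySem.Dict String Tr) f => d.insert f Tr.leaf) d).getD k Tr.leaf = Tr.leaf := by
  induction l with
  | nil => intro d h; exact h
  | cons f l ih =>
    intro d h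
    refine ih _ ?_
    rw [PySem.Dict.getD_insert]
    split <;> simp [h]

-- one row: an insert-update loop over Nodup keys updates each key once
lemma getD_row (feats : List String) (u : String → Tr → Tr) :
    ∀ (d : PySem.Dict String Tr) (k : String), feats.Nodup →
    (feats.foldl (fun (d : PySem.Dict String Tr) f => d.insert f (u f (d.getD f Tr.leaf))) d).getD k Tr.leaf
      = if k ∈ feats then u k (d.getD k Tr.leaf) else d.getD k Tr.leaf := by
  induction feats with
  | nil => intro d k _; simp
  | cons f feats ih =>
    intro d k hnd
    rcases List.nodup_cons.mp hnd with ⟨hf, hnd'⟩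
    rw [List.foldl_cons, ih _ k hnd']
    by_cases hk : k = f
    · subst hk
      simp [hf]
    · rw [PySem.Dict.getD_insert, if_neg hk]
      simp [List.mem_cons, hk]

-- the whole pass over X, projected at one key k ∈ feats
lemma getD_pass (feats : List String) (hnd : feats.Nodup) (X : List (List (String × String)))
    (k : String) (hk : k ∈ feats) : ∀ (d : PySem.Dict String Tr),
    (X.foldl
        (fun (d : PySem.Dict String Tr) row =>
          feats.foldl (fun d feat => d.insert feat (tins (d.getD feat Tr.leaf) (pyRowGet row feat))) d)
        d).getD k Tr.leaf
      = X.foldl (fun t row => tins t (pyRowGet row k)) (d.getD k Tr.leaf) := by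
  induction X with
  | nil => intro d; rfl
  | cons row X ih =>
    intro d
    rw [List.foldl_cons, List.foldl_cons, ih]
    rw [getD_row feats (fun f t => tins t (pyRowGet row f)) d k hnd, if_pos hk]

-- ---- A's enumerate-dict equals the insert-with-current-size fold, for distinct fresh keys ----
lemma enumFold_eq_foldSz : ∀ (vals : List String) (d : PySem.Dict String Int),
    vals.Nodup → (∀ x ∈ vals, d.contains x = false) →
    (PySem.List.enumerate vals (d.size : Int)).foldl (fun (d : PySem.Dict String Int) p => d.insert p.2 p.1) d
      = vals.foldl (fun (d : PySem.Dict String Int) v => d.insert v (d.size : Int)) d := by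
  intro vals
  induction vals with
  | nil => intro d _ _; simp [PySem.List.enumerate]
  | cons v t ih =>
    intro d hnd hfresh
    rcases List.nodup_cons.mp hnd with ⟨hvt, hndt⟩
    have hszv : (d.insert v (d.size : Int)).size = d.size + 1 := by
      rw [PySem.Dict.size_insert, hfresh v List.mem_cons_self]; simp
    have hfresh' : ∀ x ∈ t, (d.insert v (d.size : Int)).contains x = false := by
      intro x hx
      rw [PySem.Dict.contains_insert]
      have : x ≠ v := fun h => hvt (h ▸ hx)
      simp [this, hfresh x (List.mem_cons_of_mem _ hx)]
    have hcast : ((d.size : Int) + 1) = ((d.insert v (d.size : Int)).size : Int) := by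
      rw [hszv]; push_cast; ring
    simp only [PySem.List.enumerate, List.foldl_cons, hcast, ih _ hndt hfresh']

-- per feature in feature_order, A's enc equals B's enc
lemma enc_eq (X : List (List (String × String))) (feature_order : List String)
    (feat : String) (hfeat : feat ∈ feature_order) :
    (PySem.List.enumerate (PySem.List.sorted (PySem.Set.ofList (X.map (fun row => pyRowGet row feat))) (fun v => v))).foldl
        (fun (d : PySem.Dict String Int) p => d.insert p.2 p.1) PySem.Dict.empty
      = (inord (((X.foldl
            (fun (d : PySem.Dict String Tr) row =>
              (PySem.Set.ofList feature_order).foldl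
                (fun d f => d.insert f (tins (d.getD f Tr.leaf) (pyRowGet row f))) d)
            (feature_order.foldl (fun (d : PySem.Dict String Tr) f => d.insert f Tr.leaf) PySem.Dict.empty))).getD feat Tr.leaf)).foldl
        (fun (d : PySem.Dict String Int) v => d.insert v (d.size : Int)) PySem.Dict.empty := by
  have hk : feat ∈ (PySem.Set.ofList feature_order : List String) :=
    (PySem.Set.mem_ofList _ _).mpr hfeat
  rw [getD_pass (PySem.Set.ofList feature_order) (PySem.Set.nodup_ofList _) X feat hk,
      getD_init feature_order feat PySem.Dict.empty rfl]
  rw [← List.foldl_map, inord_foldl_eq_sorted]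
  have hnd : (PySem.List.sorted (PySem.Set.ofList (X.map (fun row => pyRowGet row feat))) (fun v => v)).Nodup :=
    (PySem.List.sorted_perm (PySem.Set.ofList (X.map (fun row => pyRowGet row feat))) (fun v => v) false).nodup_iff.mpr
      (PySem.Set.nodup_ofList _)
  exact enumFold_eq_foldSz _ PySem.Dict.empty hnd (fun x _ => rfl)

-- ===== VERDICT (by name: the statement is the Claim_ definition above) =====
theorem build_id_maps_spec : Claim_equal_build_id_maps := by
  intro X feature_order _ _
  unfold Spec_build_id_maps build_id_maps build_id_maps_alt
  simp only
  rw [PySem.List.foldl_congr_mem' (h := fun feat hfeat st => by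
    rw [enc_eq X feature_order feat hfeat])]
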